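-- pv_equiv track=rewrite | github.com/khm1102/BOJ | 백준/Silver/1740. 거듭제곱/거듭제곱.py | get_nth_number
-- ===== SOURCE A (Python) =====
-- def get_nth_number(N):
--     result = 0
--     pow_of_3 = 1
--
--     while N > 0:
--         if N % 2 == 1:
--             result += pow_of_3
--         pow_of_3 *= 3
--         N //= 2
--
--     return result
-- ===== SOURCE B (Python) =====
-- def get_nth_number(N):
--     if N <= 0:
--         return 0
--     # Horner evaluation over the binary digits, most-significant first.
--     result = 0
--     for d in _bits(N):
--         result = result * 3 + d
--     return result
--
-- def _bits(N):
--     if N <= 0: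
--         return []
--     return _bits(N // 2) + [N % 2]
-- ===== Notes on version B (the rewrite author's own statement) =====
-- stated objective: alternative
-- what changed: B builds the binary digits most-significant-first and evaluates the base-3 value by Horner's rule (result = result*3 + d), dropping A's low-to-high loop with its explicit power-of-3 accumulator.
import Mathlib
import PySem

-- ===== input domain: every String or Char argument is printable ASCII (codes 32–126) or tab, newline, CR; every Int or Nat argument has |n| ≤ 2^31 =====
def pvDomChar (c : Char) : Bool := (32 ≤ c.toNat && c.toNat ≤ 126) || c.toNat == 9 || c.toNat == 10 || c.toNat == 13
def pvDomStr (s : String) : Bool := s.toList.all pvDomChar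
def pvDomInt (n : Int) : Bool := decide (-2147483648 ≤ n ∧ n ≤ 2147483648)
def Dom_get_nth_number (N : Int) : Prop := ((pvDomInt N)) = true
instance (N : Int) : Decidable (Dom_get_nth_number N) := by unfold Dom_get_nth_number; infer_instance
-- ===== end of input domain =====

-- B replaces A's low-to-high power-of-3 accumulation by Horner evaluation over the binary digits, most-significant first (objective: alternative).

-- ===== PORT A =====
-- while-loop of A as structural recursion on the state (N, result, pow_of_3)
def getNthLoopA (N result pow_of_3 : Int) : Int :=
  if h : N > 0 then
    getNthLoopA (PySem.Int.floordiv N 2)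
      (if PySem.Int.mod N 2 = 1 then result + pow_of_3 else result)
      (pow_of_3 * 3)
  else result
termination_by N.toNat
decreasing_by
  have h2 : PySem.Int.floordiv N 2 = N / 2 := PySem.Int.floordiv_eq_ediv_of_pos (by omega)
  rw [h2]; omega

def get_nth_number (N : Int) : Int := getNthLoopA N 0 1

-- ===== PORT B =====
-- _bits: binary digits of N, most-significant first
def pvBits (N : Int) : List Int :=
  if h : N ≤ 0 then []
  else pvBits (PySem.Int.floordiv N 2) ++ [PySem.Int.mod N 2]
termination_by N.toNat
decreasing_by
  have h2 : PySem.Int.floordiv N 2 = N / 2 := PySem.Int.floordiv_eq_ediv_of_pos (by omega)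
  rw [h2]; omega

def get_nth_number_alt (N : Int) : Int :=
  if N ≤ 0 then 0
  else (pvBits N).foldl (fun result d => result * 3 + d) 0

-- ===== PRECONDITION & SPEC =====
def Spec_get_nth_number (N : Int) (out : Int) : Prop := out = get_nth_number_alt N
instance (N : Int) (out : Int) : Decidable (Spec_get_nth_number N out) := by unfold Spec_get_nth_number; infer_instance

-- ===== CLAIM (what is proved, stated in full; the proofs are below) =====
def Claim_equal_get_nth_number : Prop := ∀ (N : Int), Dom_get_nth_number N → Spec_get_nth_number N (get_nth_number N)

-- ===== LEMMAS AND PROOFS =====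
theorem foldl_horner_shift (l : List Int) (a : Int) :
    l.foldl (fun result d => result * 3 + d) a
      = a * 3 ^ l.length + l.foldl (fun result d => result * 3 + d) 0 := by
  induction l generalizing a with
  | nil => simp
  | cons x xs ih =>
    simp only [List.foldl_cons, List.length_cons]
    rw [ih (a * 3 + x), ih (0 * 3 + x)]
    ring

theorem alt_rec (N : Int) (hN : 0 < N) :
    get_nth_number_alt N = 3 * get_nth_number_alt (N / 2) + N % 2 := by
  have hfd : PySem.Int.floordiv N 2 = N / 2 := PySem.Int.floordiv_eq_ediv_of_pos (by omega)
  have hmd : PySem.Int.mod N 2 = N % 2 := PySem.Int.mod_eq_emod_of_pos (by omega)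
  rw [get_nth_number_alt, if_neg (by omega), pvBits, dif_neg (by omega), hfd, hmd,
    List.foldl_append]
  simp only [List.foldl_cons, List.foldl_nil]
  rw [foldl_horner_shift]
  by_cases h2 : N / 2 ≤ 0
  · have : N / 2 = 0 := le_antisymm h2 (Int.ediv_nonneg (by omega) (by omega))
    rw [get_nth_number_alt, if_pos h2, this, pvBits, dif_pos (by omega)]
    simp
  · rw [get_nth_number_alt, if_neg h2]
    ring

theorem loopA_eq (n : Nat) : ∀ (N result pow_of_3 : Int), N.toNat ≤ n →
    getNthLoopA N result pow_of_3 = result + pow_of_3 * get_nth_number_alt N := by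
  induction n with
  | zero =>
    intro N result pow_of_3 hle
    have hN : N ≤ 0 := by omega
    rw [getNthLoopA, dif_neg (by omega), get_nth_number_alt, if_pos hN]
    ring
  | succ n ih =>
    intro N result pow_of_3 hle
    by_cases hN : 0 < N
    · have hfd : PySem.Int.floordiv N 2 = N / 2 := PySem.Int.floordiv_eq_ediv_of_pos (by omega)
      have hmd : PySem.Int.mod N 2 = N % 2 := PySem.Int.mod_eq_emod_of_pos (by omega)
      have hm : N % 2 = 0 ∨ N % 2 = 1 := by omega
      rw [getNthLoopA, dif_pos hN, hfd, hmd,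
        ih (N / 2) _ _ (by omega), alt_rec N hN]
      rcases hm with hm | hm <;> simp [hm] <;> ring
    · rw [getNthLoopA, dif_neg hN, get_nth_number_alt, if_pos (by omega)]
      ring

-- ===== VERDICT (by name: the statement is the Claim_ definition above) =====
theorem get_nth_number_spec : Claim_equal_get_nth_number := by
  intro N _
  unfold Spec_get_nth_number get_nth_number
  rw [loopA_eq N.toNat N 0 1 le_rfl]
  ring
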